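-- pv_equiv track=rewrite | github.com/MinChihHsu/emergency-data-collector | scripts/process_logs.py | normalize_base_name
-- ===== SOURCE A (Python) =====
-- def normalize_base_name(base_name):
--     """
--     Normalize base name by merging Pixel model names.
--     Example:
--         US_T-Mobile_Pixel_9_xxx -> US_T-Mobile_Pixel9_xxx
--         US_T-Mobile_Pixel_10_xxx -> US_T-Mobile_Pixel10_xxx
--         US_T-Mobile_SM-G9910_xxx -> US_T-Mobile_SM-G9910_xxx (unchanged)
--     """
--     parts = base_name.split('_')
--
--     # Find Pixel model pattern: Pixel_{number}
--     for i in range(len(parts) - 1):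
--         if parts[i] == 'Pixel' and parts[i + 1].isdigit():
--             # Merge Pixel and number
--             parts[i] = f'Pixel{parts[i + 1]}'
--             parts.pop(i + 1)
--             break
--
--     return '_'.join(parts)
-- ===== SOURCE B (Python) =====
-- def normalize_base_name(base_name):
--     # Single pass: fold over the segments with (prev, merged) state, emitting
--     # the output string directly, instead of staged find/mutate/join passes.
--     first, *rest = base_name.split('_')
--     res = first
--     prev = first
--     merged = False
--     for part in rest:
--         if not merged and prev == 'Pixel' and part.isdigit():
--             res += part
--             merged = True
--         else:
--             res = res + '_' + part
--         prev = part
--     return res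
-- ===== Notes on version B (the rewrite author's own statement) =====
-- stated objective: alternative
-- what changed: B replaces A's three staged passes (split, index loop mutating the parts list in place, then '_'.join) by a single fold over the remaining segments with (prev, merged) state that appends to the output string directly, merging the first 'Pixel'+digits pair as it streams past.
import Mathlib
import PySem

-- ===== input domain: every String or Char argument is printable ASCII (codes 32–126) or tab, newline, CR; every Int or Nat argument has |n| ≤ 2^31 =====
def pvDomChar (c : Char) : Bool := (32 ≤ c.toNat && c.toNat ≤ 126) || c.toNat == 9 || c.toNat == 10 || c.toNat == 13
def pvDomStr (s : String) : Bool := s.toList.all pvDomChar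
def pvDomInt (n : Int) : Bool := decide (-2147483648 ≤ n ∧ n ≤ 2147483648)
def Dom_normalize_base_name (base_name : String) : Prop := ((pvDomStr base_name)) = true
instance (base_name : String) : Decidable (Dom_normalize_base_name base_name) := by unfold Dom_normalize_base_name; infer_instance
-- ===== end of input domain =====

-- B replaces A's three staged passes (split, index-loop that mutates the parts
-- list in place, join) by a single fold over the segments with (prev, merged)
-- state that emits the output string directly; same values, no speed claim.

-- ===== PORT A =====
-- base_name.split('_') = (split? … "_").getD [] (split? is some: sep ≠ "")
-- the for-loop over range(len(parts)-1) with break, as fuel recursion on the index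
def pvAuxA (parts : List String) (i : Nat) (fuel : Nat) : List String :=
  match fuel with
  | 0 => parts
  | fuel + 1 =>
    if parts.getD i "" = "Pixel" ∧ PySem.Str.strIsdigit (parts.getD (i + 1) "") = true then
      -- parts[i] = f'Pixel{parts[i+1]}'; parts.pop(i+1); break
      let p := parts.set i ("Pixel" ++ parts.getD (i + 1) "")
      match PySem.List.pop? p ((i : Int) + 1) with
      | some (_, r) => r
      | none => p
    else pvAuxA parts (i + 1) fuel

def normalize_base_name (base_name : String) : String :=
  let parts := (PySem.Str.split? base_name "_").getD []
  PySem.Str.join "_" (pvAuxA parts 0 (parts.length - 1))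

-- ===== PORT B =====
-- the loop body: state (res, prev, merged), one step per remaining segment
def pvStepB (st : String × String × Bool) (part : String) : String × String × Bool :=
  match st with
  | (res, prev, merged) =>
    if merged = false ∧ prev = "Pixel" ∧ PySem.Str.strIsdigit part = true then
      (res ++ part, part, true)
    else (res ++ "_" ++ part, part, merged)

-- first, *rest = base_name.split('_')  (split('_') is never empty; [] arm is unreachable)
def normalize_base_name_alt (base_name : String) : String :=
  match (PySem.Str.split? base_name "_").getD [] with
  | [] => ""
  | first :: rest => (List.foldl pvStepB (first, first, false) rest).1

-- ===== PRECONDITION & SPEC =====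
def Spec_normalize_base_name (base_name : String) (out : String) : Prop := out = normalize_base_name_alt base_name
instance (base_name : String) (out : String) : Decidable (Spec_normalize_base_name base_name out) := by unfold Spec_normalize_base_name; infer_instance

-- ===== CLAIM (what is proved, stated in full; the proofs are below) =====
def Claim_equal_normalize_base_name : Prop := ∀ (base_name : String), Dom_normalize_base_name base_name → Spec_normalize_base_name base_name (normalize_base_name base_name)

-- ===== LEMMAS AND PROOFS =====

-- '_'-joined tail: "_" ++ q ++ "_" ++ q' ++ …
def pvTail : List String → String
  | [] => ""
  | q :: t => "_" ++ q ++ pvTail t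

-- what B's fold appends after 'prev' while not yet merged
def pvTailMerge : String → List String → String
  | _, [] => ""
  | prev, q :: t =>
    if prev = "Pixel" ∧ PySem.Str.strIsdigit q = true then q ++ pvTail t
    else "_" ++ q ++ pvTailMerge q t

-- structural form of A's first-match merge on the parts list
def pvMergeList : List String → List String
  | x :: y :: t =>
    if x = "Pixel" ∧ PySem.Str.strIsdigit y = true then ("Pixel" ++ y) :: t
    else x :: pvMergeList (y :: t)
  | l => l

-- B's old-style search index (proof artefact characterising A's loop)
def pvFindB (parts : List String) (k : Nat) : Option Nat :=
  if h : k + 1 < parts.length then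
    if parts.getD k "" = "Pixel" ∧ PySem.Str.strIsdigit (parts.getD (k + 1) "") = true then
      some k
    else pvFindB parts (k + 1)
  else none
termination_by parts.length - k

lemma pvSetErase (parts : List String) (k : Nat) (m : String) (h : k + 1 < parts.length) :
    (parts.set k m).eraseIdx (k + 1) = parts.take k ++ m :: parts.drop (k + 2) := by
  rw [List.set_eq_take_append_cons_drop, if_pos (by omega)]
  have hrw : parts.take k ++ m :: parts.drop (k + 1) = (parts.take k ++ [m]) ++ parts.drop (k + 1) := by simp
  have hl : (parts.take k ++ [m]).length = k + 1 := by simp [List.length_take]; omega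
  rw [hrw, List.eraseIdx_append, if_neg (by omega), hl]
  simp [List.tail_drop]

-- A's loop from index k (with fuel = remaining iterations) computes: the list unchanged
-- if the search from k finds nothing, else the rebuilt list at the found index
lemma pvAux_eq_find (fuel : Nat) : ∀ (parts : List String) (k : Nat),
    parts.length - 1 - k = fuel →
    pvAuxA parts k fuel = (match pvFindB parts k with
      | none => parts
      | some i => parts.take i ++ ("Pixel" ++ parts.getD (i + 1) "") :: parts.drop (i + 2)) := by
  induction fuel with
  | zero =>
    intro parts k hf
    rw [pvFindB, dif_neg (by omega)]
    rfl
  | succ n ih =>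
    intro parts k hf
    have h : k + 1 < parts.length := by omega
    rw [pvFindB, dif_pos h]
    by_cases hc : parts.getD k "" = "Pixel" ∧ PySem.Str.strIsdigit (parts.getD (k + 1) "") = true
    · rw [if_pos hc]
      show (if _ then _ else _) = _
      rw [if_pos hc]
      have hcast : ((k : Int) + 1) = ((k + 1 : Nat) : Int) := by push_cast; ring
      have hlen : k + 1 < (parts.set k ("Pixel" ++ parts.getD (k + 1) "")).length := by
        simpa using h
      simp only [hcast, PySem.List.pop?_natCast _ _ hlen]
      exact pvSetErase parts k _ h
    · rw [if_neg hc]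
      show (if _ then _ else _) = _
      rw [if_neg hc]
      exact ih parts (k + 1) (by omega)

-- the search shifts under a cons
lemma pvFind_shift (n : Nat) : ∀ (xs : List String) (x : String) (k : Nat),
    xs.length - k = n →
    pvFindB (x :: xs) (k + 1) = (pvFindB xs k).map (· + 1) := by
  induction n with
  | zero =>
    intro xs x k hn
    rw [pvFindB, dif_neg (by simp; omega), pvFindB, dif_neg (by omega)]
    rfl
  | succ n ih =>
    intro xs x k hn
    by_cases hk : k + 1 < xs.length
    · conv_lhs => rw [pvFindB]
      conv_rhs => rw [pvFindB]
      rw [dif_pos (show k + 1 + 1 < (x :: xs).length by simp only [List.length_cons]; omega), dif_pos hk]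
      simp only [List.getD_cons_succ]
      by_cases hc : xs.getD k "" = "Pixel" ∧ PySem.Str.strIsdigit (xs.getD (k + 1) "") = true
      · rw [if_pos hc, if_pos hc]; rfl
      · rw [if_neg hc, if_neg hc]
        exact ih xs x (k + 1) (by omega)
    · rw [pvFindB, dif_neg (by simp; omega), pvFindB, dif_neg hk]
      rfl

-- the found-index rebuild IS the structural first-match merge
lemma pvFind_merge : ∀ (parts : List String),
    (match pvFindB parts 0 with
      | none => parts
      | some i => parts.take i ++ ("Pixel" ++ parts.getD (i + 1) "") :: parts.drop (i + 2)) =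
    pvMergeList parts := by
  intro parts
  induction parts with
  | nil => rw [pvFindB, dif_neg (by simp)]; rfl
  | cons x rest ih =>
    cases rest with
    | nil => rw [pvFindB, dif_neg (by simp)]; rfl
    | cons y t =>
      rw [pvFindB, dif_pos (by simp)]
      simp only [List.getD_cons_zero, List.getD_cons_succ]
      by_cases hc : x = "Pixel" ∧ PySem.Str.strIsdigit y = true
      · rw [if_pos hc]
        show _ = pvMergeList (x :: y :: t)
        rw [pvMergeList, if_pos hc]
        simp
      · rw [if_neg hc]
        show (match pvFindB (x :: y :: t) (0 + 1) with
          | none => x :: y :: t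
          | some i => (x :: y :: t).take i ++ ("Pixel" ++ ((x :: y :: t).getD (i + 1) "")) :: (x :: y :: t).drop (i + 2)) = _
        rw [pvFind_shift (y :: t).length (y :: t) x 0 (by simp)]
        show _ = pvMergeList (x :: y :: t)
        rw [pvMergeList, if_neg hc, ← ih]
        cases pvFindB (y :: t) 0 with
        | none => rfl
        | some i => simp [List.take_succ_cons, List.drop_succ_cons]

-- join with "_" written head-first
lemma pvJoin_eq (t : List String) : ∀ (m : String), PySem.Str.join "_" (m :: t) = m ++ pvTail t := by
  induction t with
  | nil =>
    intro m
    simp [PySem.Str.join, PySem.Chars.join, List.intercalate, pvTail]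
  | cons q t ih =>
    intro m
    have h : PySem.Str.join "_" (m :: q :: t) = m ++ "_" ++ PySem.Str.join "_" (q :: t) := by
      simp only [PySem.Str.join, List.map_cons]
      rw [PySem.Chars.join_cons_cons, String.ofList_append, String.ofList_append,
        String.ofList_toList, String.ofList_toList]
    rw [h, ih q, pvTail]
    simp [String.append_assoc]

-- once merged, B's fold only appends "_" ++ part
lemma pvFold_merged (l : List String) : ∀ (res prev : String),
    (List.foldl pvStepB (res, prev, true) l).1 = res ++ pvTail l := by
  induction l with
  | nil => intro res prev; simp [pvTail]
  | cons q t ih =>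
    intro res prev
    show (List.foldl pvStepB (pvStepB (res, prev, true) q) t).1 = _
    rw [pvStepB, if_neg (by simp)]
    rw [ih, pvTail]
    simp [String.append_assoc]

-- B's fold before merging: it appends pvTailMerge prev l
lemma pvFold_eq (l : List String) : ∀ (prev res : String),
    (List.foldl pvStepB (res, prev, false) l).1 = res ++ pvTailMerge prev l := by
  induction l with
  | nil => intro prev res; simp [pvTailMerge]
  | cons q t ih =>
    intro prev res
    show (List.foldl pvStepB (pvStepB (res, prev, false) q) t).1 = _
    by_cases hc : prev = "Pixel" ∧ PySem.Str.strIsdigit q = true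
    · rw [pvStepB, if_pos (by exact ⟨rfl, hc.1, hc.2⟩)]
      rw [pvFold_merged, pvTailMerge, if_pos hc]
      simp [String.append_assoc]
    · rw [pvStepB, if_neg (fun h => hc ⟨h.2.1, h.2.2⟩)]
      rw [ih, pvTailMerge, if_neg hc]
      simp [String.append_assoc]

lemma pvMerge_ne_nil (y : String) (t : List String) : pvMergeList (y :: t) ≠ [] := by
  cases t with
  | nil => simp [pvMergeList]
  | cons u v =>
    rw [pvMergeList]
    split_ifs <;> simp

-- joining A's merged list = head ++ B's pvTailMerge
lemma pvMergeJoin (rest : List String) : ∀ (p0 : String),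
    PySem.Str.join "_" (pvMergeList (p0 :: rest)) = p0 ++ pvTailMerge p0 rest := by
  induction rest with
  | nil =>
    intro p0
    show PySem.Str.join "_" [p0] = _
    rw [pvJoin_eq, pvTailMerge]
    rfl
  | cons q t ih =>
    intro p0
    by_cases hc : p0 = "Pixel" ∧ PySem.Str.strIsdigit q = true
    · rw [pvMergeList, if_pos hc, pvJoin_eq, pvTailMerge, if_pos hc, hc.1]
      simp [String.append_assoc]
    · rw [pvMergeList, if_neg hc, pvTailMerge, if_neg hc]
      cases hM : pvMergeList (q :: t) with
      | nil => exact absurd hM (pvMerge_ne_nil q t)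
      | cons r rs =>
        have hIH := ih q
        rw [hM, pvJoin_eq] at hIH
        rw [pvJoin_eq, pvTail]
        simp only [String.append_assoc]
        rw [hIH]

-- ===== VERDICT (by name: the statement is the Claim_ definition above) =====
theorem normalize_base_name_spec : Claim_equal_normalize_base_name := by
  intro s _
  unfold Spec_normalize_base_name normalize_base_name normalize_base_name_alt
  show PySem.Str.join "_" (pvAuxA ((PySem.Str.split? s "_").getD []) 0
    (((PySem.Str.split? s "_").getD []).length - 1)) = _
  have hA := pvAux_eq_find (((PySem.Str.split? s "_").getD []).length - 1)
    ((PySem.Str.split? s "_").getD []) 0 (by omega)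
  rw [hA, pvFind_merge]
  cases hp : (PySem.Str.split? s "_").getD [] with
  | nil => rfl
  | cons p0 rest =>
    rw [pvMergeJoin]
    exact (pvFold_eq rest p0 p0).symm
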